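-- pv_equiv track=rewrite | github.com/MiguelBarroso05/Python | lab_6/ex3.py | verify_gtin_code
-- ===== SOURCE A (Python) =====
-- def verify_gtin_code(code):
--     digits = [int(d) for d in str(code)]
--     if len(digits) < 2:
--         return False
--     provided_check_digit = digits[-1]
--     digits = digits[:-1]
--     total = 0
--     for i, digit in enumerate(reversed(digits)):
--         weight = 3 if i % 2 == 0 else 1
--         total += digit * weight
--     calculated_check_digit = (10 - (total % 10)) % 10
--     if total == 0:
--         return False
--     return provided_check_digit == calculated_check_digit
-- ===== SOURCE B (Python) =====
-- def _weighted(rds):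
--     # rds is least-significant-first; weights repeat 1,3,1,3,... from the right end
--     if not rds:
--         return 0
--     if len(rds) == 1:
--         return rds[0]
--     return rds[0] + 3 * rds[1] + _weighted(rds[2:])
--
-- def verify_gtin_code(code):
--     # Valid iff the full weighted sum (check digit included at weight 1) is divisible by ten,
--     # computed by a recursion that consumes two digits per step; all-zero payload stays invalid.
--     s = str(code)
--     if len(s) < 2:
--         return False
--     ds = [int(c) for c in s]
--     if not any(ds[:-1]):
--         return False
--     return _weighted(ds[::-1]) % 10 == 0
-- ===== Notes on version B (the rewrite author's own statement) =====
-- stated objective: alternative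
-- what changed: B drops A's check-digit reconstruction and index-parity loop entirely: it tests whether the full weighted sum (check digit included at weight 1) is divisible by ten, computing that sum by a recursive helper that consumes two digits per step from the reversed digit list, with an explicit all-zero-payload guard.
import Mathlib
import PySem

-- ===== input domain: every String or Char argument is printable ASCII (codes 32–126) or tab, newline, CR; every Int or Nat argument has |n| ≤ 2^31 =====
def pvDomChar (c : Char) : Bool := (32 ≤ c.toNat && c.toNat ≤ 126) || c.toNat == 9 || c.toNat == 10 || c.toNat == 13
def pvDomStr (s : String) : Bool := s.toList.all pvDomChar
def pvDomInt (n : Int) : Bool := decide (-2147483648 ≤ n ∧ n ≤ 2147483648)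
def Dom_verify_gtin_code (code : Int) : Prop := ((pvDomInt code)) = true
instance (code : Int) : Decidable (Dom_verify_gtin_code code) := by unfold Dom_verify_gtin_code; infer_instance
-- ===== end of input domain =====

-- B replaces A's reversed-enumerate parity-weight loop and check-digit reconstruction by a
-- divisibility-by-ten test of the full weighted sum, built by a two-digits-per-step recursion;
-- objective: alternative (same value everywhere A returns).

-- ===== PORT A =====
def verify_gtin_code (code : Int) : Bool :=
  -- digits = [int(d) for d in str(code)]  (int(d) can raise ValueError, e.g. on '-': excluded by Pre_)
  match (PySem.Int.toChars code).mapM (fun c => PySem.Int.ofChars? [c]) with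
  | none => false
  | some digits =>
    if digits.length < 2 then false
    else
      match PySem.List.pyGet? digits (-1) with
      | none => false  -- unreachable: length ≥ 2
      | some provided_check_digit =>
        let digits' := PySem.List.slice digits none (some (-1))
        let total := (PySem.List.enumerate digits'.reverse).foldl
          (fun t p => t + p.2 * (if PySem.Int.mod p.1 2 == 0 then 3 else 1)) 0
        let calculated_check_digit := PySem.Int.mod (10 - PySem.Int.mod total 10) 10
        if total == 0 then false
        else provided_check_digit == calculated_check_digit

-- ===== PORT B =====
-- _weighted(rds): rds least-significant-first, weights 1,3 repeating; two digits per step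
def pvWeighted : List Int → Int
  | [] => 0
  | [d] => d
  | d :: e :: t => d + 3 * e + pvWeighted t

def verify_gtin_code_alt (code : Int) : Bool :=
  let s := PySem.Int.toChars code
  if s.length < 2 then false
  else
    match s.mapM (fun c => PySem.Int.ofChars? [c]) with
    | none => false  -- int(c) raises ValueError (excluded by Pre_)
    | some ds =>
      if !((PySem.List.slice ds none (some (-1))).any (fun d => !(d == 0))) then false
      else
        match PySem.List.slice? ds none none (-1) with
        | none => false  -- unreachable: step ≠ 0
        | some rds => PySem.Int.mod (pvWeighted rds) 10 == 0

-- ===== PRECONDITION & SPEC =====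
-- A raises ValueError on negative code (int() applied to the '-' character); Pre_ keeps the naturals.
def Pre_verify_gtin_code (code : Int) : Prop := 0 ≤ code
instance (code : Int) : Decidable (Pre_verify_gtin_code code) := by unfold Pre_verify_gtin_code; infer_instance
def pvWitness_verify_gtin_code : Int := (9638507)

def Spec_verify_gtin_code (code : Int) (out : Bool) : Prop := out = verify_gtin_code_alt code
instance (code : Int) (out : Bool) : Decidable (Spec_verify_gtin_code code out) := by unfold Spec_verify_gtin_code; infer_instance

-- ===== CLAIM (what is proved, stated in full; the proofs are below) =====
def Claim_equal_verify_gtin_code : Prop := ∀ (code : Int), Dom_verify_gtin_code code → Pre_verify_gtin_code code → Spec_verify_gtin_code code (verify_gtin_code code)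

-- ===== LEMMAS AND PROOFS =====

-- the alternating weighted digit sum (digits least-significant first, starting weight w)
def pvWsum : List Int → Int → Int
  | [], _ => 0
  | d :: t, w => d * w + pvWsum t (4 - w)

theorem pv_toDigitsCore_eq : ∀ (fuel n : Nat) (ds : List Char), n < fuel → 0 < n →
    Nat.toDigitsCore 10 fuel n ds = ((Nat.digits 10 n).map Nat.digitChar).reverse ++ ds := by
  intro fuel
  induction fuel with
  | zero => omega
  | succ f ih =>
    intro n ds hlt hn
    rw [Nat.digits_def' (by norm_num : 1 < 10) hn]
    simp only [Nat.toDigitsCore]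
    by_cases h0 : n / 10 = 0
    · simp [h0, Nat.digits_zero]
    · rw [if_neg h0, ih (n / 10) _ (by omega : n / 10 < f) (by omega)]
      simp

theorem pv_toChars_eq (m : Nat) (hm : 0 < m) :
    PySem.Int.toChars (m : Int) = ((Nat.digits 10 m).map Nat.digitChar).reverse := by
  have h1 : PySem.Int.toChars (m : Int) = Nat.toDigits 10 m := by
    simp [PySem.Int.toChars, Int.not_lt.mpr (Int.natCast_nonneg m), Int.toNat_natCast]
  rw [h1, Nat.toDigits, pv_toDigitsCore_eq (m + 1) m [] (by omega) hm, List.append_nil]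

theorem pv_digitChar_parse (d : Nat) (hd : d < 10) :
    PySem.Int.ofChars? [Nat.digitChar d] = some (d : Int) := by
  revert hd; revert d; decide

theorem pv_mapM_digits (l : List Nat) (hl : ∀ x ∈ l, x < 10) :
    (l.map Nat.digitChar).mapM (fun c => PySem.Int.ofChars? [c]) = some (l.map (fun (x : Nat) => (x : Int))) := by
  induction l with
  | nil => rfl
  | cons d t ih =>
    simp only [List.map_cons, List.mapM_cons,
      pv_digitChar_parse d (hl d (by simp)), ih (fun x hx => hl x (by simp [hx]))]
    rfl

theorem pv_parse_toChars (m : Nat) (hm : 0 < m) :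
    (PySem.Int.toChars (m : Int)).mapM (fun c => PySem.Int.ofChars? [c]) =
      some (((Nat.digits 10 m).map (fun (x : Nat) => (x : Int))).reverse) := by
  rw [pv_toChars_eq m hm, ← List.map_reverse, pv_mapM_digits, List.map_reverse]
  intro x hx
  exact Nat.digits_lt_base (by norm_num) (List.mem_reverse.mp hx)

theorem pv_enum_foldl : ∀ (l : List Int) (k : Nat) (acc : Int),
    (PySem.List.enumerate l (k : Int)).foldl
      (fun t p => t + p.2 * (if PySem.Int.mod p.1 2 == 0 then 3 else 1)) acc
    = acc + pvWsum l (if k % 2 = 0 then 3 else 1) := by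
  intro l
  induction l with
  | nil => simp [PySem.List.enumerate_nil, pvWsum]
  | cons d t ih =>
    intro k acc
    rw [PySem.List.enumerate_cons]
    simp only [List.foldl_cons]
    have hk1 : (k : Int) + 1 = ((k + 1 : Nat) : Int) := by push_cast; ring
    rw [hk1, ih (k + 1)]
    have hc : PySem.Int.mod (k : Int) 2 = ((k % 2 : Nat) : Int) := by
      exact_mod_cast PySem.Int.mod_natCast k 2
    by_cases h2 : k % 2 = 0
    · have h3 : (k + 1) % 2 = 1 := by omega
      simp only [hc, h2, h3, pvWsum]
      simp
      ring
    · have h2' : k % 2 = 1 := by omega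
      have h3 : (k + 1) % 2 = 0 := by omega
      simp only [hc, h2', h3, pvWsum]
      simp
      ring

theorem pv_weighted_eq_wsum : ∀ (l : List Int), pvWeighted l = pvWsum l 1 := by
  intro l
  induction l using pvWeighted.induct with
  | case1 => simp [pvWeighted, pvWsum]
  | case2 d => simp [pvWeighted, pvWsum]
  | case3 d e t ih => simp [pvWeighted, pvWsum, ih]; ring

theorem pv_wsum_nonneg : ∀ (l : List Nat) (w : Int), w = 1 ∨ w = 3 →
    0 ≤ pvWsum (l.map (fun (x : Nat) => (x : Int))) w := by
  intro l
  induction l with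
  | nil => intro w _; simp [pvWsum]
  | cons d t ih =>
    intro w hw
    have h1 : 0 ≤ (d : Int) * w := by rcases hw with h | h <;> simp [h]
    have h2 : 0 ≤ pvWsum (t.map (fun (x : Nat) => (x : Int))) (4 - w) := by
      apply ih; rcases hw with h | h <;> rw [h] <;> norm_num
    simp only [List.map_cons, pvWsum]; omega

theorem pv_wsum_pos : ∀ (l : List Nat) (w : Int), w = 1 ∨ w = 3 → (∃ x ∈ l, 0 < x) →
    0 < pvWsum (l.map (fun (x : Nat) => (x : Int))) w := by
  intro l
  induction l with
  | nil => rintro w _ ⟨x, hx, _⟩; simp at hx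
  | cons d t ih =>
    rintro w hw ⟨x, hx, hxpos⟩
    have hw' : (4 : Int) - w = 1 ∨ (4 : Int) - w = 3 := by rcases hw with h | h <;> simp [h]
    simp only [List.map_cons, pvWsum]
    rcases List.mem_cons.mp hx with rfl | hxt
    · have h1 : 0 < (x : Int) * w := by
        have hx1 : (1 : Int) ≤ x := by exact_mod_cast hxpos
        rcases hw with h | h <;> nlinarith
      have h2 := pv_wsum_nonneg t (4 - w) hw'
      omega
    · have h1 : 0 ≤ (d : Int) * w := by
        rcases hw with h | h <;> simp [h]
      have h2 := ih (4 - w) hw' ⟨x, hxt, hxpos⟩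
      omega

theorem pv_wsum_zero_of_all_zero : ∀ (l : List Nat) (w : Int), (∀ x ∈ l, x = 0) →
    pvWsum (l.map (fun (x : Nat) => (x : Int))) w = 0 := by
  intro l
  induction l with
  | nil => intro w _; simp [pvWsum]
  | cons d t ih =>
    intro w hall
    have hd : d = 0 := hall d (by simp)
    simp only [List.map_cons, pvWsum, ih (4 - w) (fun x hx => hall x (by simp [hx])), hd]
    simp

-- ===== VERDICT (by name: the statement is the Claim_ definition above) =====
theorem verify_gtin_code_spec : Claim_equal_verify_gtin_code := by
  intro code _ hpre
  unfold Spec_verify_gtin_code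
  obtain ⟨m, rfl⟩ : ∃ m : Nat, code = (m : Int) := ⟨code.toNat, (Int.toNat_of_nonneg hpre).symm⟩
  by_cases hm0 : m = 0
  · subst hm0; decide
  have hm : 0 < m := Nat.pos_of_ne_zero hm0
  have hlenchars : (PySem.Int.toChars (m : Int)).length = (Nat.digits 10 m).length := by
    rw [pv_toChars_eq m hm]; simp
  unfold verify_gtin_code verify_gtin_code_alt
  rw [pv_parse_toChars m hm]
  by_cases hsmall : m < 10
  · -- one digit: both length guards fire
    have hd10 : m / 10 = 0 := by omega
    have hdig : Nat.digits 10 m = [m % 10] := by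
      rw [Nat.digits_def' (by norm_num : 1 < 10) hm, hd10, Nat.digits_zero]
    simp [hdig, hlenchars]
  · -- m ≥ 10
    have hq : 0 < m / 10 := by omega
    have hdig : Nat.digits 10 m = m % 10 :: Nat.digits 10 (m / 10) :=
      Nat.digits_def' (by norm_num : 1 < 10) hm
    have hqne : Nat.digits 10 (m / 10) ≠ [] := Nat.digits_ne_nil_iff_ne_zero.mpr (by omega)
    set L : List Int := (Nat.digits 10 (m / 10)).map (fun (x : Nat) => (x : Int)) with hL
    have hLne : L ≠ [] := fun h => hqne (List.map_eq_nil_iff.mp (hL ▸ h))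
    have hdigL : (Nat.digits 10 m).map (fun (x : Nat) => (x : Int)) = ((m % 10 : Nat) : Int) :: L := by
      rw [hdig, List.map_cons]
    rw [hdigL]
    have hlen2 : ¬ ((PySem.Int.toChars (m : Int)).length < 2) := by
      rw [hlenchars, hdig]
      simp only [List.length_cons]
      have := List.length_pos_iff.mpr hqne
      omega
    rw [if_neg hlen2]
    split
    · next heq => exact absurd heq (by simp)
    · next digits heq =>
      rw [Option.some.injEq] at heq
      subst heq
      have hlen : ¬ ((((m % 10 : Nat) : Int) :: L).reverse.length < 2) := by
        simp only [List.length_reverse, List.length_cons]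
        have := List.length_pos_iff.mpr hLne
        omega
      rw [if_neg hlen, PySem.List.pyGet?_neg_one, List.getLast?_reverse, List.head?_cons]
      split
      · next heq2 => exact absurd heq2 (by simp)
      · next provided heq2 =>
        rw [Option.some.injEq] at heq2
        subst heq2
        have henum := pv_enum_foldl L 0 0
        simp only [Nat.cast_zero, Nat.zero_mod, reduceIte, zero_add] at henum
        rw [pv_parse_toChars m hm, hdigL]  -- the B-side parse (missed by the earlier rw under B's let-binder)
        simp only [PySem.List.slice_to_neg_one, List.dropLast_reverse, List.tail_cons,
          List.reverse_reverse, PySem.List.slice?_none_none_neg_one]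
        rw [henum]
        set t : Int := pvWsum L 3 with ht
        have htnn : 0 ≤ t := pv_wsum_nonneg _ 3 (Or.inr rfl)
        have hweq : pvWeighted (((m % 10 : Nat) : Int) :: L) = ((m % 10 : Nat) : Int) + t := by
          rw [pv_weighted_eq_wsum]
          simp [pvWsum, ht]
        by_cases hz : ∃ x ∈ Nat.digits 10 (m / 10), 0 < x
        · -- payload nonzero: both proceed to the arithmetic comparison
          have htpos : 0 < t := pv_wsum_pos _ 3 (Or.inr rfl) hz
          have hany : (L.reverse.any (fun d => !(d == 0))) = true := by
            obtain ⟨x, hx, hxp⟩ := hz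
            refine List.any_eq_true.mpr ⟨(x : Int), List.mem_reverse.mpr (List.mem_map_of_mem hx), ?_⟩
            simp; omega
          rw [hany]
          simp only [Bool.not_true, Bool.false_eq_true, if_false]
          rw [if_neg (show ¬ ((t == 0) = true) by simp; omega), hweq]
          have hd0 : (0 : Int) ≤ ((m % 10 : Nat) : Int) ∧ ((m % 10 : Nat) : Int) < 10 := by
            constructor
            · exact Int.natCast_nonneg _
            · exact_mod_cast Nat.mod_lt m (by norm_num)
          have hmodt : PySem.Int.mod t 10 = t % 10 := PySem.Int.mod_eq_emod_of_pos (by norm_num)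
          have hmodc : PySem.Int.mod (10 - t % 10) 10 = (10 - t % 10) % 10 :=
            PySem.Int.mod_eq_emod_of_pos (by norm_num)
          have hmodb : PySem.Int.mod (((m % 10 : Nat) : Int) + t) 10 = (((m % 10 : Nat) : Int) + t) % 10 :=
            PySem.Int.mod_eq_emod_of_pos (by norm_num)
          rw [hmodt, hmodc, hmodb, Bool.eq_iff_iff]
          simp only [beq_iff_eq]
          omega
        · -- payload all zeros: A's total==0 guard and B's any() guard both fire
          push Not at hz
          have ht0 : t = 0 := pv_wsum_zero_of_all_zero _ 3 (fun x hx => by have := hz x hx; omega)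
          have hany : (L.reverse.any (fun d => !(d == 0))) = false := by
            rw [List.any_eq_false]
            intro d hd
            obtain ⟨x, hx, rfl⟩ := List.mem_map.mp (List.mem_reverse.mp hd)
            have := hz x hx
            simp; omega
          rw [hany, ht0]
          simp
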